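-- pv_equiv track=rewrite | github.com/zgotter/algorithm-python | programmers/카카오/level2/후보키_01_ok.py | check_already_include
-- ===== SOURCE A (Python) =====
-- from itertools import combinations
--
-- def check_already_include(candidate, result):
--     check_include = False
--     for i in range(1, len(candidate)):
--         if not check_include:
--             for comb in combinations(candidate, i):
--                 if list(comb) in result:
--                     check_include = True
--                     break
--     return check_include
-- ===== SOURCE B (Python) =====
-- def check_already_include(candidate, result):
--     def is_subseq(r, c):
--         it = iter(c)
--         return all(x in it for x in r)
--     n = len(candidate)
--     return any(0 < len(r) < n and is_subseq(r, candidate) for r in result)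
-- ===== Notes on version B (the rewrite author's own statement) =====
-- stated objective: faster
-- what changed: Instead of enumerating all combinations of candidate of each size and testing membership in result, B scans result once and checks each r directly as a proper nonempty subsequence of candidate with a two-pointer test.
import Mathlib
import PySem

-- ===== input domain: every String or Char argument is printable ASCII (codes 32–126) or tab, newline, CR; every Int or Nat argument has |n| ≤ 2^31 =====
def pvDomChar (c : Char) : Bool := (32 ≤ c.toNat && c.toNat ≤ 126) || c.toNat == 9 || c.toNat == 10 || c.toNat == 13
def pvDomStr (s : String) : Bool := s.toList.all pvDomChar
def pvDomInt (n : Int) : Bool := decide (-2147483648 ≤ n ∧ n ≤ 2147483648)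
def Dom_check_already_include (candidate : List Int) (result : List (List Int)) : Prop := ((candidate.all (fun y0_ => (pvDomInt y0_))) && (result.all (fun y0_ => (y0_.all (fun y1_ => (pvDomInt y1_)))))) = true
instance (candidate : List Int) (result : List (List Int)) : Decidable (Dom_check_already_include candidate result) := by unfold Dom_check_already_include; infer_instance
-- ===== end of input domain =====

-- B scans result once and tests each element as a proper nonempty subsequence of candidate,
-- instead of A's enumeration of all combinations of every proper size (objective: faster, asymptotic).

-- ===== PORT A =====
-- itertools.combinations(l, n), transliterated (order of tuples matches itertools)
def pyCombs : Nat → List Int → List (List Int)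
  | 0, _ => [[]]
  | _ + 1, [] => []
  | n + 1, x :: xs => (pyCombs n xs).map (fun c => x :: c) ++ pyCombs (n + 1) xs

def check_already_include (candidate : List Int) (result : List (List Int)) : Bool :=
  (PySem.List.pyRange 1 (PySem.List.len candidate) 1).foldl
    (fun check_include i =>
      if check_include = false then
        (pyCombs i.toNat candidate).any (fun comb => result.contains comb)
      else check_include) false

-- ===== PORT B =====
-- two-pointer subsequence test (Source B's iterator trick 'all(x in it for x in r)')
def isSubseq : List Int → List Int → Bool
  | [], _ => true
  | _ :: _, [] => false
  | x :: r, y :: c => if x = y then isSubseq r c else isSubseq (x :: r) c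

def check_already_include_alt (candidate : List Int) (result : List (List Int)) : Bool :=
  result.any (fun r =>
    decide (0 < r.length) && decide (r.length < candidate.length) && isSubseq r candidate)

-- ===== PRECONDITION & SPEC =====
def Spec_check_already_include (candidate : List Int) (result : List (List Int)) (out : Bool) : Prop := out = check_already_include_alt candidate result
instance (candidate : List Int) (result : List (List Int)) (out : Bool) : Decidable (Spec_check_already_include candidate result out) := by unfold Spec_check_already_include; infer_instance

-- ===== CLAIM (what is proved, stated in full; the proofs are below) =====
def Claim_equal_check_already_include : Prop := ∀ (candidate : List Int) (result : List (List Int)), Dom_check_already_include candidate result → Spec_check_already_include candidate result (check_already_include candidate result)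

-- ===== LEMMAS AND PROOFS =====

theorem mem_pyCombs {c l : List Int} {n : Nat} : c ∈ pyCombs n l ↔ c.Sublist l ∧ c.length = n := by
  induction l generalizing n c with
  | nil =>
    cases n with
    | zero => simp [pyCombs]
    | succ n =>
      simp [pyCombs]
      rintro rfl h
      simp at h
  | cons x xs ih =>
    cases n with
    | zero =>
      simp [pyCombs]
      rintro rfl
      simp
    | succ n =>
      simp only [pyCombs, List.mem_append, List.mem_map, ih]
      constructor
      · rintro (⟨c', ⟨hs, hl⟩, rfl⟩ | ⟨hs, hl⟩)
        · exact ⟨List.Sublist.cons₂ _ hs, by simp [hl]⟩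
        · exact ⟨List.Sublist.cons _ hs, hl⟩
      · rintro ⟨hs, hl⟩
        cases hs with
        | cons _ hs => exact Or.inr ⟨hs, hl⟩
        | cons₂ _ hs =>
          exact Or.inl ⟨_, ⟨hs, by simpa using hl⟩, rfl⟩

theorem isSubseq_iff {r c : List Int} : isSubseq r c = true ↔ r.Sublist c := by
  induction c generalizing r with
  | nil => cases r <;> simp [isSubseq]
  | cons y c ih =>
    cases r with
    | nil => simp [isSubseq]
    | cons x r =>
      by_cases h : x = y
      · subst h
        rw [show isSubseq (x :: r) (x :: c) = isSubseq r c from by simp [isSubseq], ih,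
          List.cons_sublist_cons]
      · rw [show isSubseq (x :: r) (y :: c) = isSubseq (x :: r) c from by simp [isSubseq, h], ih]
        constructor
        · exact fun hs => List.Sublist.cons _ hs
        · intro hs
          cases hs with
          | cons _ hs => exact hs
          | cons₂ _ _ => exact absurd rfl h

theorem foldl_flag_or {p : Int → Bool} (l : List Int) (b : Bool) :
    l.foldl (fun chk i => if chk = false then p i else chk) b = (b || l.any p) := by
  induction l generalizing b with
  | nil => simp
  | cons i l ih =>
    cases b <;> simp [List.foldl_cons, ih, List.any_cons]

-- ===== VERDICT (by name: the statement is the Claim_ definition above) =====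
theorem check_already_include_spec : Claim_equal_check_already_include := by
  intro candidate result _
  show check_already_include candidate result = check_already_include_alt candidate result
  rw [Bool.eq_iff_iff]
  unfold check_already_include check_already_include_alt
  rw [foldl_flag_or]
  simp only [Bool.false_or, List.any_eq_true, PySem.List.mem_pyRange_one,
    List.contains_iff_mem, Bool.and_eq_true, decide_eq_true_eq, isSubseq_iff,
    PySem.List.len_eq]
  constructor
  · rintro ⟨i, ⟨h1, h2⟩, comb, hcomb, hmem⟩
    obtain ⟨hsub, hlen⟩ := mem_pyCombs.mp hcomb
    refine ⟨comb, hmem, ⟨?_, ?_⟩, hsub⟩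
    · omega
    · omega
  · rintro ⟨r, hmem, ⟨h0, hlt⟩, hsub⟩
    refine ⟨(r.length : Int), ⟨by omega, by omega⟩, r, ?_, hmem⟩
    exact mem_pyCombs.mpr ⟨hsub, by simp⟩
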